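-- pv_equiv track=rewrite | github.com/nicoleg5/Py.-Project-3 | main.py | choice_a
-- ===== SOURCE A (Python) =====
-- def choice_a(one):  #Returns a list of all Isis rectangles of type n.
--
--   low = 2 * one + 1
--   high = 4 * one
--   list_rectangles = []
--
--   for x in range(low, high+1):
--     numerator = 2 * x * one
--     denominator = x - 2 * one
--     if numerator % denominator == 0:
--       b = numerator // denominator
--       list_rectangles.append((x, b))
--   return(list_rectangles)
-- ===== SOURCE B (Python) =====
-- def choice_a(one):  # Returns a list of all Isis rectangles of type n.
--     # (x - 2n)(b - 2n) = 4n^2, so solutions correspond to divisors d of 4n^2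
--     # with 1 <= d <= 2n.  Enumerate divisors of n in O(sqrt(n)); every divisor
--     # of 4n^2 is a*u*v with a in {1,2,4} and u, v divisors of n.
--     if one <= 0:
--         return []
--     small = []
--     large = []
--     i = 1
--     while i * i <= one:
--         if one % i == 0:
--             small.append(i)
--             if i != one // i:
--                 large.append(one // i)
--         i += 1
--     divs_n = small + large
--     two_n = 2 * one
--     sq = two_n * two_n
--     ds = set()
--     for u in divs_n:
--         for v in divs_n:
--             uv = u * v
--             for a in (1, 2, 4):
--                 d = a * uv
--                 if d <= two_n:
--                     ds.add(d)
--     return [(two_n + d, two_n + sq // d) for d in sorted(ds)]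
-- ===== Notes on version B (the rewrite author's own statement) =====
-- stated objective: faster
-- what changed: Instead of scanning all x in [2n+1,4n] and testing 2xn % (x-2n), B uses the identity (x-2n)(b-2n)=4n^2: it enumerates the divisors of n in O(sqrt(n)), forms all divisors of 4n^2 as a*u*v with a in {1,2,4} and u,v divisors of n, keeps those <= 2n in a set, and emits the sorted results.
import Mathlib
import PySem

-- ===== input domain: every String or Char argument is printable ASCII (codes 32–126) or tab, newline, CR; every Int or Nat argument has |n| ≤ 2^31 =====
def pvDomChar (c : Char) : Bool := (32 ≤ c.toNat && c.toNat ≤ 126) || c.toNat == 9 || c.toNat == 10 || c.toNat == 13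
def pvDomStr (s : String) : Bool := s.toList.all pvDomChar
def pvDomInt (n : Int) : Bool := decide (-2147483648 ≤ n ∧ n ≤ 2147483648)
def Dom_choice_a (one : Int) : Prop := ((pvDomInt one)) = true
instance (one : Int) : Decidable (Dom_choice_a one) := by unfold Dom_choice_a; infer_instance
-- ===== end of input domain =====

-- B replaces A's O(n) scan of x ∈ [2n+1, 4n] by divisor enumeration: (x-2n)(b-2n) = 4n²,
-- so B lists divisors of n in O(√n), forms divisors of 4n² as a·u·v (a ∈ {1,2,4}), keeps
-- those ≤ 2n in a set and emits them sorted.  (objective: faster)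


-- ===== PORT A =====
def choice_a (one : Int) : List (Int × Int) :=
  let low := 2 * one + 1
  let high := 4 * one
  (PySem.List.pyRange low (high + 1) 1).foldl
    (fun list_rectangles x =>
      let numerator := 2 * x * one
      let denominator := x - 2 * one
      if PySem.Int.mod numerator denominator = 0 then
        list_rectangles ++ [(x, PySem.Int.floordiv numerator denominator)]
      else list_rectangles) []

-- ===== PORT B =====
-- the `while i * i <= one` divisor-collecting loop of Source B
def chaDivLoop (one i : Int) (small large : List Int) : List Int × List Int :=
  if _h : i * i ≤ one then
    if PySem.Int.mod one i = 0 then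
      if i ≠ PySem.Int.floordiv one i then
        chaDivLoop one (i + 1) (small ++ [i]) (large ++ [PySem.Int.floordiv one i])
      else
        chaDivLoop one (i + 1) (small ++ [i]) large
    else chaDivLoop one (i + 1) small large
  else (small, large)
termination_by (one + 1 - i).toNat
decreasing_by
  all_goals
    have h0 : (0:Int) ≤ i * i := mul_self_nonneg i
    by_cases hi : i ≤ 0
    · have : (0:Int) ≤ one := le_trans h0 _h
      omega
    · have h1 : (1:Int) ≤ i := by omega
      have h2 : i * 1 ≤ i * i := mul_le_mul_of_nonneg_left h1 (by omega)
      have : i ≤ one := by linarith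
      omega

-- the inner `for a in (1, 2, 4)` loop of Source B
def chaInner (two_n uv : Int) (ds : PySem.Set Int) : PySem.Set Int :=
  ([1, 2, 4] : List Int).foldl
    (fun ds a =>
      let d := a * uv
      if d ≤ two_n then PySem.Set.add ds d else ds) ds

-- the `for u … for v …` loops of Source B
def chaBuild (two_n : Int) (divs_n : List Int) : PySem.Set Int :=
  divs_n.foldl
    (fun ds u => divs_n.foldl (fun ds v => chaInner two_n (u * v) ds) ds)
    PySem.Set.empty

def choice_a_alt (one : Int) : List (Int × Int) :=
  if one ≤ 0 then []
  else
    let p := chaDivLoop one 1 [] []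
    let divs_n := p.1 ++ p.2
    let two_n := 2 * one
    let sq := two_n * two_n
    let ds := chaBuild two_n divs_n
    (PySem.List.sorted ds (fun x => x)).map
      (fun d => (two_n + d, two_n + PySem.Int.floordiv sq d))

-- ===== PRECONDITION & SPEC =====
def Spec_choice_a (one : Int) (out : List (Int × Int)) : Prop := out = choice_a_alt one
instance (one : Int) (out : List (Int × Int)) : Decidable (Spec_choice_a one out) := by unfold Spec_choice_a; infer_instance

-- ===== CLAIM (what is proved, stated in full; the proofs are below) =====
def Claim_equal_choice_a : Prop := ∀ (one : Int), Dom_choice_a one → Spec_choice_a one (choice_a one)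

-- ===== LEMMAS AND PROOFS =====

-- membership in the result of the divisor loop
lemma chaDivLoop_mem (one i : Int) (small large : List Int) (y : Int) :
    1 ≤ i →
      (y ∈ (chaDivLoop one i small large).1 ++ (chaDivLoop one i small large).2 ↔
        (y ∈ small ++ large ∨ ∃ j : Int, i ≤ j ∧ j * j ≤ one ∧ j ∣ one ∧
          (y = j ∨ (y = one / j ∧ j ≠ one / j)))) := by
  fun_induction chaDivLoop one i small large
  case case1 i small large h1 h2 h3 ih =>
    intro hi
    have hd : i ∣ one := (PySem.Int.mod_eq_zero_iff_dvd one i).mp h2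
    have hf : PySem.Int.floordiv one i = one / i :=
      PySem.Int.floordiv_eq_ediv_of_pos (by omega)
    rw [hf] at h3 ih ⊢
    rw [ih (by omega)]
    have hE : (∃ j : Int, i ≤ j ∧ j * j ≤ one ∧ j ∣ one ∧
          (y = j ∨ (y = one / j ∧ j ≠ one / j))) ↔
        ((y = i ∨ (y = one / i ∧ i ≠ one / i)) ∨ ∃ j : Int, i + 1 ≤ j ∧ j * j ≤ one ∧ j ∣ one ∧
          (y = j ∨ (y = one / j ∧ j ≠ one / j))) := by
      constructor
      · rintro ⟨j, hj, rest⟩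
        rcases eq_or_lt_of_le hj with rfl | hlt
        · exact Or.inl rest.2.2
        · exact Or.inr ⟨j, by omega, rest⟩
      · rintro (hp | ⟨j, hj, rest⟩)
        · exact ⟨i, le_refl i, h1, hd, hp⟩
        · exact ⟨j, by omega, rest⟩
    rw [hE]
    clear ih hE h2 hf hd h1 hi
    simp only [List.mem_append, List.mem_singleton]
    generalize (∃ j : Int, i + 1 ≤ j ∧ j * j ≤ one ∧ j ∣ one ∧
        (y = j ∨ (y = one / j ∧ j ≠ one / j))) = E
    tauto
  case case2 i small large h1 h2 h3 ih =>
    intro hi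
    have hd : i ∣ one := (PySem.Int.mod_eq_zero_iff_dvd one i).mp h2
    have hf : PySem.Int.floordiv one i = one / i :=
      PySem.Int.floordiv_eq_ediv_of_pos (by omega)
    rw [hf] at h3
    have he : one / i = i := (not_ne_iff.mp h3).symm
    rw [ih (by omega)]
    have hE : (∃ j : Int, i ≤ j ∧ j * j ≤ one ∧ j ∣ one ∧
          (y = j ∨ (y = one / j ∧ j ≠ one / j))) ↔
        ((y = i ∨ (y = one / i ∧ i ≠ one / i)) ∨ ∃ j : Int, i + 1 ≤ j ∧ j * j ≤ one ∧ j ∣ one ∧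
          (y = j ∨ (y = one / j ∧ j ≠ one / j))) := by
      constructor
      · rintro ⟨j, hj, rest⟩
        rcases eq_or_lt_of_le hj with rfl | hlt
        · exact Or.inl rest.2.2
        · exact Or.inr ⟨j, by omega, rest⟩
      · rintro (hp | ⟨j, hj, rest⟩)
        · exact ⟨i, le_refl i, h1, hd, hp⟩
        · exact ⟨j, by omega, rest⟩
    rw [hE, he]
    clear ih hE h2 h3 hf hd he h1 hi
    simp only [List.mem_append, List.mem_singleton]
    generalize (∃ j : Int, i + 1 ≤ j ∧ j * j ≤ one ∧ j ∣ one ∧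
        (y = j ∨ (y = one / j ∧ j ≠ one / j))) = E
    tauto
  case case3 i small large h1 h2 ih =>
    intro hi
    have hd : ¬ i ∣ one := fun hdd => h2 ((PySem.Int.mod_eq_zero_iff_dvd one i).mpr hdd)
    rw [ih (by omega)]
    have hE : (∃ j : Int, i ≤ j ∧ j * j ≤ one ∧ j ∣ one ∧
          (y = j ∨ (y = one / j ∧ j ≠ one / j))) ↔
        (∃ j : Int, i + 1 ≤ j ∧ j * j ≤ one ∧ j ∣ one ∧
          (y = j ∨ (y = one / j ∧ j ≠ one / j))) := by
      constructor
      · rintro ⟨j, hj, hjj, hjd, hy⟩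
        rcases eq_or_lt_of_le hj with rfl | hlt
        · exact absurd hjd hd
        · exact ⟨j, by omega, hjj, hjd, hy⟩
      · rintro ⟨j, hj, rest⟩
        exact ⟨j, by omega, rest⟩
    rw [hE]
  case case4 i small large h1 =>
    intro hi
    have hE : ¬ ∃ j : Int, i ≤ j ∧ j * j ≤ one ∧ j ∣ one ∧
        (y = j ∨ (y = one / j ∧ j ≠ one / j)) := by
      rintro ⟨j, hj, hjj, -⟩
      have : i * i ≤ j * j := mul_le_mul hj hj (by omega) (by omega)
      have : ¬ i * i ≤ one := h1
      linarith
    simp [hE]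

-- divs_n lists exactly the positive divisors of one
lemma chaDivLoop_spec (one : Int) (h : 0 < one) (y : Int) :
    y ∈ (chaDivLoop one 1 [] []).1 ++ (chaDivLoop one 1 [] []).2 ↔ (1 ≤ y ∧ y ∣ one) := by
  rw [chaDivLoop_mem one 1 [] [] y le_rfl]
  simp only [List.append_nil, List.not_mem_nil, false_or]
  constructor
  · rintro ⟨j, hj, hjj, hjd, hy⟩
    obtain ⟨c, hc⟩ := hjd
    have hc0 : 0 < c := by nlinarith
    have hq : one / j = c := by
      rw [hc]; exact Int.mul_ediv_cancel_left c (by omega)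
    rcases hy with rfl | ⟨rfl, -⟩
    · exact ⟨hj, ⟨c, hc⟩⟩
    · rw [hq]
      exact ⟨by omega, Dvd.intro_left j hc.symm⟩
  · rintro ⟨hy, hyd⟩
    obtain ⟨c, hc⟩ := hyd
    have hc0 : 0 < c := by nlinarith
    by_cases hsq : y * y ≤ one
    · exact ⟨y, hy, hsq, ⟨c, hc⟩, Or.inl rfl⟩
    · refine ⟨c, by omega, ?_, Dvd.intro_left y hc.symm, Or.inr ⟨?_, ?_⟩⟩
      · have hcy : c < y := by nlinarith
        calc c * c ≤ c * y := by nlinarith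
        _ = one := by rw [hc]; ring
      · rw [hc, mul_comm, Int.mul_ediv_cancel_left y (by omega)]
      · have hcy : c < y := by nlinarith
        rw [hc, mul_comm, Int.mul_ediv_cancel_left y (by omega)]
        omega

-- generic foldl membership / nodup preservation
lemma mem_foldl_of_step {α : Type} (g : PySem.Set Int → α → PySem.Set Int)
    (P : α → Int → Prop) (hg : ∀ s x y, y ∈ g s x ↔ y ∈ s ∨ P x y) :
    ∀ (l : List α) (s : PySem.Set Int) (y : Int),
      y ∈ l.foldl g s ↔ y ∈ s ∨ ∃ x ∈ l, P x y := by
  intro l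
  induction l with
  | nil => simp
  | cons x xs ih => intro s y; simp [List.foldl, ih, hg]; tauto

lemma nodup_foldl_of_step {α : Type} (g : PySem.Set Int → α → PySem.Set Int)
    (hg : ∀ s x, s.Nodup → (g s x).Nodup) :
    ∀ (l : List α) (s : PySem.Set Int), s.Nodup → (l.foldl g s).Nodup := by
  intro l
  induction l with
  | nil => exact fun s h => h
  | cons x xs ih => intro s hs; exact ih _ (hg _ _ hs)

lemma mem_chaInner (t uv : Int) (ds : PySem.Set Int) (y : Int) :
    y ∈ chaInner t uv ds ↔ y ∈ ds ∨ ∃ a ∈ ([1, 2, 4] : List Int), y = a * uv ∧ a * uv ≤ t := by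
  unfold chaInner
  exact mem_foldl_of_step _ (fun a y => y = a * uv ∧ a * uv ≤ t)
    (by
      intro s x y
      simp only
      split_ifs with h <;> simp [PySem.Set.mem_add] <;> tauto) _ _ _

lemma nodup_chaInner (t uv : Int) (ds : PySem.Set Int) (h : ds.Nodup) :
    (chaInner t uv ds).Nodup := by
  unfold chaInner
  exact nodup_foldl_of_step _
    (by
      intro s x hs
      simp only
      split_ifs with h2
      · exact PySem.Set.nodup_add _ _ hs
      · exact hs) _ _ h

lemma mem_chaBuild (t : Int) (divs : List Int) (y : Int) :
    y ∈ chaBuild t divs ↔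
      ∃ u ∈ divs, ∃ v ∈ divs, ∃ a ∈ ([1, 2, 4] : List Int), y = a * (u * v) ∧ a * (u * v) ≤ t := by
  unfold chaBuild
  rw [mem_foldl_of_step _
    (fun u y => ∃ v ∈ divs, ∃ a ∈ ([1, 2, 4] : List Int), y = a * (u * v) ∧ a * (u * v) ≤ t)
    (by
      intro s u y
      exact mem_foldl_of_step _
        (fun v y => ∃ a ∈ ([1, 2, 4] : List Int), y = a * (u * v) ∧ a * (u * v) ≤ t)
        (fun s v y => mem_chaInner t (u * v) s y) _ _ _)]
  simp [PySem.Set.empty]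

lemma nodup_chaBuild (t : Int) (divs : List Int) : (chaBuild t divs).Nodup := by
  unfold chaBuild
  exact nodup_foldl_of_step _
    (fun s u hs => nodup_foldl_of_step _ (fun s v hs => nodup_chaInner t (u * v) s hs) _ _ hs)
    _ _ (by simp [PySem.Set.empty])

-- Nat core: a divisor of 4n² splits as a·u·v with a | 4 and u, v | n
lemma nat_decomp (N D : ℕ) (hN : 0 < N) (_hD : 0 < D) (h : D ∣ 4 * (N * N)) :
    ∃ a u v : ℕ, a ∣ 4 ∧ u ∣ N ∧ v ∣ N ∧ D = a * (u * v) := by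
  set a := Nat.gcd D 4 with ha
  have ha0 : 0 < a := Nat.gcd_pos_of_pos_right D (by norm_num)
  have ha4 : a ∣ 4 := Nat.gcd_dvd_right D 4
  have haD : a ∣ D := Nat.gcd_dvd_left D 4
  set m := D / a with hm
  have hDm : D = a * m := (Nat.mul_div_cancel' haD).symm
  have h4f : 4 = a * (4 / a) := (Nat.mul_div_cancel' ha4).symm
  have hcop : Nat.Coprime m (4 / a) := Nat.coprime_div_gcd_div_gcd ha0
  have hmN : m ∣ N * N := by
    have h1 : a * m ∣ a * ((4 / a) * (N * N)) := by
      rw [← mul_assoc, ← h4f, ← hDm]; exact h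
    have h2 : m ∣ (4 / a) * (N * N) := (mul_dvd_mul_iff_left (by omega : a ≠ 0)).mp h1
    exact hcop.dvd_of_dvd_mul_left h2
  set u := Nat.gcd m N with hu
  have hu0 : 0 < u := Nat.gcd_pos_of_pos_right m hN
  have huN : u ∣ N := Nat.gcd_dvd_right m N
  have hum : u ∣ m := Nat.gcd_dvd_left m N
  set v := m / u with hv
  have hmv : m = u * v := (Nat.mul_div_cancel' hum).symm
  have hNu : N = u * (N / u) := (Nat.mul_div_cancel' huN).symm
  have hcop2 : Nat.Coprime v (N / u) := Nat.coprime_div_gcd_div_gcd hu0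
  have hvN : v ∣ N := by
    have h1 : u * v ∣ u * ((N / u) * N) := by
      rw [← mul_assoc, ← hNu, ← hmv]; exact hmN
    have h2 : v ∣ (N / u) * N := (mul_dvd_mul_iff_left (by omega : u ≠ 0)).mp h1
    exact hcop2.dvd_of_dvd_mul_left h2
  exact ⟨a, u, v, ha4, huN, hvN, by rw [hDm, hmv]⟩

-- the set ds holds exactly the divisors of 4n² in [1, 2n]
lemma mem_ds (one : Int) (h : 0 < one) (y : Int) :
    y ∈ chaBuild (2 * one) ((chaDivLoop one 1 [] []).1 ++ (chaDivLoop one 1 [] []).2) ↔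
      (1 ≤ y ∧ y ≤ 2 * one ∧ y ∣ 4 * (one * one)) := by
  rw [mem_chaBuild]
  constructor
  · rintro ⟨u, hu, v, hv, a, ha, rfl, hle⟩
    rw [chaDivLoop_spec one h] at hu hv
    obtain ⟨hu1, hud⟩ := hu
    obtain ⟨hv1, hvd⟩ := hv
    have huv : u * v ∣ one * one := mul_dvd_mul hud hvd
    simp only [List.mem_cons, List.not_mem_nil, or_false] at ha
    rcases ha with rfl | rfl | rfl <;>
      exact ⟨by nlinarith, hle, mul_dvd_mul (by norm_num) huv⟩
  · rintro ⟨hy1, hy2, hyd⟩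
    have hons : ((one.toNat : ℤ)) = one := Int.toNat_of_nonneg (by omega)
    have hys : ((y.toNat : ℤ)) = y := Int.toNat_of_nonneg (by omega)
    have hnat : y.toNat ∣ 4 * (one.toNat * one.toNat) := by
      rw [← Int.natCast_dvd_natCast]; push_cast [hons, hys]; exact hyd
    obtain ⟨a, u, v, ha4, huN, hvN, hD⟩ :=
      nat_decomp one.toNat y.toNat (by omega) (by omega) hnat
    have ha0 : 0 < a := Nat.pos_of_dvd_of_pos ha4 (by norm_num)
    have hu0 : 0 < u := Nat.pos_of_dvd_of_pos huN (by omega)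
    have hv0 : 0 < v := Nat.pos_of_dvd_of_pos hvN (by omega)
    have hui : (u : ℤ) ∣ one := by rw [← hons]; exact_mod_cast huN
    have hvi : (v : ℤ) ∣ one := by rw [← hons]; exact_mod_cast hvN
    have hyeq : y = (a : ℤ) * ((u : ℤ) * (v : ℤ)) := by rw [← hys]; exact_mod_cast hD
    refine ⟨(u : ℤ), ?_, (v : ℤ), ?_, (a : ℤ), ?_, hyeq, by rw [← hyeq]; exact hy2⟩
    · rw [chaDivLoop_spec one h]; exact ⟨by exact_mod_cast hu0, hui⟩
    · rw [chaDivLoop_spec one h]; exact ⟨by exact_mod_cast hv0, hvi⟩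
    · have ha : a ≤ 4 := Nat.le_of_dvd (by norm_num) ha4
      interval_cases a
      · simp
      · simp
      · exact absurd ha4 (by decide)
      · simp

-- A 'if p(x): out.append(f(x))' loop with a Prop test
lemma foldl_append_ite {α β : Type} (P : α → Prop) [DecidablePred P] (f : α → β) :
    ∀ (l : List α) (acc : List β),
      l.foldl (fun acc x => if P x then acc ++ [f x] else acc) acc
        = acc ++ (l.filter (fun x => decide (P x))).map f := by
  intro l
  induction l with
  | nil => simp
  | cons x xs ih =>
    intro acc
    by_cases hx : P x <;> simp [List.foldl, hx, ih]

-- the common canonical form of both programs, for 0 < one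
lemma choice_a_canon (one : Int) (h : 0 < one) :
    choice_a one =
      ((PySem.List.pyRange 1 (2 * one + 1) 1).filter
          (fun d => decide (d ∣ 4 * (one * one)))).map
        (fun d => (2 * one + d, 2 * one + 4 * (one * one) / d)) := by
  unfold choice_a
  rw [foldl_append_ite (fun x => PySem.Int.mod (2 * x * one) (x - 2 * one) = 0)
    (fun x => (x, PySem.Int.floordiv (2 * x * one) (x - 2 * one)))]
  rw [List.nil_append]
  have hrange : PySem.List.pyRange (2 * one + 1) (4 * one + 1) 1
      = (PySem.List.pyRange 1 (2 * one + 1) 1).map (fun d => d + 2 * one) := by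
    rw [PySem.List.pyRange_one, PySem.List.pyRange_one, List.map_map]
    have ht : (4 * one + 1 - (2 * one + 1)).toNat = (2 * one + 1 - 1).toNat := by omega
    rw [ht]
    apply List.map_congr_left
    intro k _
    simp only [Function.comp]
    ring
  rw [hrange, List.filter_map]
  have hfilter : (PySem.List.pyRange 1 (2 * one + 1) 1).filter
        ((fun x => decide (PySem.Int.mod (2 * x * one) (x - 2 * one) = 0)) ∘
          (fun d => d + 2 * one))
      = (PySem.List.pyRange 1 (2 * one + 1) 1).filter
          (fun d => decide (d ∣ 4 * (one * one))) := by
    apply List.filter_congr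
    intro d hd
    simp only [Function.comp]
    apply decide_eq_decide.mpr
    have hd2 : d + 2 * one - 2 * one = d := by ring
    rw [hd2, PySem.Int.mod_eq_zero_iff_dvd]
    have hnum : 2 * (d + 2 * one) * one = 2 * one * d + 4 * (one * one) := by ring
    rw [hnum]
    exact dvd_add_right ⟨2 * one, by ring⟩
  rw [hfilter, List.map_map]
  apply List.map_congr_left
  intro d hd
  rw [List.mem_filter, PySem.List.mem_pyRange_one] at hd
  obtain ⟨⟨hd1, hd2⟩, hdvd⟩ := hd
  simp only [Function.comp]
  have hden : d + 2 * one - 2 * one = d := by ring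
  have hnum : 2 * (d + 2 * one) * one = 4 * (one * one) + 2 * one * d := by ring
  rw [hden, hnum, PySem.Int.floordiv_eq_ediv_of_pos (by omega : (0:ℤ) < d),
    Int.add_mul_ediv_right _ _ (by omega : d ≠ 0)]
  rw [Prod.mk.injEq]
  exact ⟨by ring, by ring⟩

lemma choice_a_alt_canon (one : Int) (h : 0 < one) :
    choice_a_alt one =
      ((PySem.List.pyRange 1 (2 * one + 1) 1).filter
          (fun d => decide (d ∣ 4 * (one * one)))).map
        (fun d => (2 * one + d, 2 * one + 4 * (one * one) / d)) := by
  unfold choice_a_alt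
  rw [if_neg (by omega : ¬ one ≤ 0)]
  show (PySem.List.sorted
      (chaBuild (2 * one) ((chaDivLoop one 1 [] []).1 ++ (chaDivLoop one 1 [] []).2))
      (fun x => x)).map
        (fun d => (2 * one + d, 2 * one + PySem.Int.floordiv (2 * one * (2 * one)) d)) = _
  have hzs : PySem.List.sorted
        (chaBuild (2 * one) ((chaDivLoop one 1 [] []).1 ++ (chaDivLoop one 1 [] []).2))
        (fun x => x)
      = (PySem.List.pyRange 1 (2 * one + 1) 1).filter
          (fun d => decide (d ∣ 4 * (one * one))) := by
    apply PySem.List.sorted_eq_of_perm_of_pairwise_lt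
    · rw [List.perm_ext_iff_of_nodup
        (((PySem.List.pairwise_lt_pyRange_one 1 (2 * one + 1)).filter _).imp ne_of_lt)
        (nodup_chaBuild _ _)]
      intro y
      rw [List.mem_filter, PySem.List.mem_pyRange_one, mem_ds one h y,
        decide_eq_true_iff]
      constructor
      · rintro ⟨⟨h1, h2⟩, h3⟩; exact ⟨h1, by omega, h3⟩
      · rintro ⟨h1, h2, h3⟩; exact ⟨⟨h1, by omega⟩, h3⟩
    · exact (PySem.List.pairwise_lt_pyRange_one 1 (2 * one + 1)).filter _
  rw [hzs]
  apply List.map_congr_left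
  intro d hd
  rw [List.mem_filter, PySem.List.mem_pyRange_one] at hd
  obtain ⟨⟨hd1, hd2⟩, hdvd⟩ := hd
  have hsq : 2 * one * (2 * one) = 4 * (one * one) := by ring
  rw [hsq, PySem.Int.floordiv_eq_ediv_of_pos (by omega : (0:ℤ) < d)]

-- ===== VERDICT (by name: the statement is the Claim_ definition above) =====
theorem choice_a_spec : Claim_equal_choice_a := by
  intro one _
  unfold Spec_choice_a
  by_cases h : one ≤ 0
  · have hA : choice_a one = [] := by
      unfold choice_a
      show List.foldl _ [] (PySem.List.pyRange (2 * one + 1) (4 * one + 1) 1) = []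
      rw [PySem.List.pyRange_one_eq_nil (by omega : 4 * one + 1 ≤ 2 * one + 1)]
      rfl
    have hB : choice_a_alt one = [] := by
      unfold choice_a_alt
      rw [if_pos h]
    rw [hA, hB]
  · rw [choice_a_canon one (by omega), choice_a_alt_canon one (by omega)]
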